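-- pv_equiv track=rewrite | github.com/syntra-vindevoy/python-1-2024 | src/chapter10/priemgetallen_ex.py | priem_getallen
-- ===== SOURCE A (Python) =====
-- def priem_getallen(max_getal: int = 1000)->dict:
--     """
--     Calculates de priem getallen
--     Args:
--         max_getal:
--
--     Returns: dict
--
--     """
--     list_priem = {}
--     for i in range(2, max_getal):
--         for j in range(2, max_getal):
--             if i % j==0 and i!=j:
--                 if list_priem.get(i) is None:
--                     list_priem[i] = [j]
--                 else:
--                     list_priem[i].append(j)
--     return list_priem
-- ===== SOURCE B (Python) =====
-- def priem_getallen(max_getal: int = 1000) -> dict: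
--     """Divisor sieve: for each j, append j to every multiple's divisor list."""
--     n = max_getal
--     d = [[] for _ in range(n)]
--     for j in range(2, n):
--         for q in range(2, (n - 1) // j + 1):
--             d[j * q].append(j)
--     return {i: d[i] for i in range(2, n) if d[i]}
-- ===== Notes on version B (the rewrite author's own statement) =====
-- stated objective: faster
-- what changed: Replaced the double scan (for every i, test every j for divisibility) by a divisor sieve that, for each j, appends j to the divisor list of each multiple j*q, then emits the non-empty lists in increasing key order.
import Mathlib
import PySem

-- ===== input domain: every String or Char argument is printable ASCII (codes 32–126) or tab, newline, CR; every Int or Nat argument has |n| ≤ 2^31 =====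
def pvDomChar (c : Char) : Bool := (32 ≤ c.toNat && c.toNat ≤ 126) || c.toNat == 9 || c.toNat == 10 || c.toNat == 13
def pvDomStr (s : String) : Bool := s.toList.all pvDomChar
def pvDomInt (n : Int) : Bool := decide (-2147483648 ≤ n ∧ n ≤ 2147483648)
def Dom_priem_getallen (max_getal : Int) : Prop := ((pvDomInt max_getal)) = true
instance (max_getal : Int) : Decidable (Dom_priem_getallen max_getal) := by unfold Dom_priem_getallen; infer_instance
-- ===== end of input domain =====

-- B replaces A's O(n^2) double divisibility scan by a divisor sieve (append j to each multiple j*q),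
-- emitting the non-empty divisor lists in increasing key order; same dict (as association list) on every input.

-- ===== PORT A =====
-- inner loop 'for j in range(2, max_getal): if i % j == 0 and i != j: …' for a fixed i
def priemInner (max_getal i : Int) (d : PySem.Dict Int (List Int)) : PySem.Dict Int (List Int) :=
  (PySem.List.pyRange 2 max_getal 1).foldl (fun d j =>
    if PySem.Int.mod i j == 0 && i != j then
      match d.get? i with
      | none => d.insert i [j]          -- list_priem[i] = [j]
      | some l => d.insert i (l ++ [j]) -- list_priem[i].append(j)
    else d) d

def priem_getallen (max_getal : Int) : List (Int × List Int) :=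
  ((PySem.List.pyRange 2 max_getal 1).foldl (fun d i => priemInner max_getal i d)
    PySem.Dict.empty).items

-- ===== PORT B =====
-- inner loop 'for q in range(2, (n - 1) // j + 1): d[j * q].append(j)';
-- the index j * q is ≥ 4 here (j, q ≥ 2), so .toNat is exact (no negative index occurs)
def sieveJ (max_getal j : Int) (d : List (List Int)) : List (List Int) :=
  (PySem.List.pyRange 2 (PySem.Int.floordiv (max_getal - 1) j + 1) 1).foldl
    (fun d q => d.set (j * q).toNat (d.getD (j * q).toNat [] ++ [j])) d

-- d after both sieve loops (d0 = [[] for _ in range(n)])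
def sieved (max_getal : Int) : List (List Int) :=
  (PySem.List.pyRange 2 max_getal 1).foldl (fun d j => sieveJ max_getal j d)
    (List.replicate max_getal.toNat [])

def priem_getallen_alt (max_getal : Int) : List (Int × List Int) :=
  -- {i: d[i] for i in range(2, n) if d[i]} : keys are the distinct, increasing i, so the
  -- dict comprehension is this association-list fold
  let d := sieved max_getal
  (PySem.List.pyRange 2 max_getal 1).foldl (fun acc i =>
    if d.getD i.toNat [] ≠ [] then acc ++ [(i, d.getD i.toNat [])] else acc) []

-- ===== PRECONDITION & SPEC =====
def Spec_priem_getallen (max_getal : Int) (out : List (Int × List Int)) : Prop := out = priem_getallen_alt max_getal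
instance (max_getal : Int) (out : List (Int × List Int)) : Decidable (Spec_priem_getallen max_getal out) := by unfold Spec_priem_getallen; infer_instance

-- ===== CLAIM (what is proved, stated in full; the proofs are below) =====
def Claim_equal_priem_getallen : Prop := ∀ (max_getal : Int), Dom_priem_getallen max_getal → Spec_priem_getallen max_getal (priem_getallen max_getal)

-- ===== LEMMAS AND PROOFS =====

-- the divisor list A collects for key i
def divsA (max_getal i : Int) : List Int :=
  (PySem.List.pyRange 2 max_getal 1).filter (fun j => PySem.Int.mod i j == 0 && i != j)

-- A's inner loop once key i is present: every accepted j is appended to i's list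
theorem foldA_some (i : Int) (cond : Int → Bool) :
    ∀ (L : List Int) (d : PySem.Dict Int (List Int)) (l : List Int),
      L.foldl (fun d j =>
        if cond j then
          match d.get? i with
          | none => d.insert i [j]
          | some l => d.insert i (l ++ [j])
        else d) (d.insert i l) = d.insert i (l ++ L.filter cond) := by
  intro L
  induction L with
  | nil => intro d l; simp
  | cons j L ih =>
      intro d l
      by_cases hc : cond j
      · simp only [List.foldl_cons, hc, if_pos, PySem.Dict.get?_insert_self,
          PySem.Dict.insert_insert_self]
        rw [ih d (l ++ [j])]
        simp [hc]
      · simp [List.foldl_cons, hc, ih d l]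

-- A's inner loop from a dict not containing i
theorem foldA_none (i : Int) (cond : Int → Bool) :
    ∀ (L : List Int) (d : PySem.Dict Int (List Int)), d.get? i = none →
      L.foldl (fun d j =>
        if cond j then
          match d.get? i with
          | none => d.insert i [j]
          | some l => d.insert i (l ++ [j])
        else d) d
      = if L.filter cond = [] then d else d.insert i (L.filter cond) := by
  intro L
  induction L with
  | nil => intro d _; simp
  | cons j L ih =>
      intro d hd
      by_cases hc : cond j
      · simp only [List.foldl_cons, hc, if_pos, hd]
        rw [foldA_some i cond L d [j]]
        simp [hc]
      · simp [List.foldl_cons, hc, ih d hd]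

theorem priemInner_eq (n i : Int) (d : PySem.Dict Int (List Int)) (hd : d.get? i = none) :
    priemInner n i d = if divsA n i = [] then d else d.insert i (divsA n i) := by
  unfold priemInner divsA
  exact foldA_none i _ (PySem.List.pyRange 2 n 1) d hd

-- A's outer loop over distinct fresh keys appends one entry per i with a non-empty list
theorem foldA_outer (n : Int) :
    ∀ (I : List Int) (d : PySem.Dict Int (List Int)), I.Nodup →
      (∀ i ∈ I, d.contains i = false) →
      (I.foldl (fun d i => priemInner n i d) d).items
        = d.items ++ I.flatMap (fun i => if divsA n i = [] then [] else [(i, divsA n i)]) := by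
  intro I
  induction I with
  | nil => intro d _ _; simp
  | cons i I ih =>
      intro d hnd hfresh
      have hci : d.contains i = false := hfresh i (by simp)
      have hgi : d.get? i = none := by
        rw [PySem.Dict.get?_eq_none_iff_contains]; exact hci
      simp only [List.foldl_cons, List.flatMap_cons, priemInner_eq n i d hgi]
      by_cases hF : divsA n i = []
      · rw [if_pos hF, ih d hnd.of_cons (fun i' hi' => hfresh i' (by simp [hi']))]
        simp [hF]
      · rw [if_neg hF,
          ih (d.insert i (divsA n i)) hnd.of_cons (fun i' hi' => by
            rw [PySem.Dict.contains_insert]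
            have hne : i' ≠ i := fun h => (List.nodup_cons.mp hnd).1 (h ▸ hi')
            simp [hne, hfresh i' (by simp [hi'])]),
          PySem.Dict.items_insert_of_not_contains _ _ hci]
        simp [hF]

theorem priem_getallen_eq_flatMap (n : Int) :
    priem_getallen n
      = (PySem.List.pyRange 2 n 1).flatMap
          (fun i => if divsA n i = [] then [] else [(i, divsA n i)]) := by
  unfold priem_getallen
  rw [foldA_outer n (PySem.List.pyRange 2 n 1) PySem.Dict.empty
    (PySem.List.nodup_pyRange_one 2 n) (fun i _ => PySem.Dict.contains_empty i)]
  simp [PySem.Dict.empty]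

theorem flatMap_ite_eq_filter_map {α β : Type} (l : List α) (G : α → List Int) (f : α → β) :
    l.flatMap (fun i => if G i = [] then [] else [f i])
      = (l.filter (fun i => decide (G i ≠ []))).map f := by
  induction l with
  | nil => simp
  | cons a l ih =>
      by_cases h : G a = [] <;> simp [h, ih]

-- ---- B side ----

-- does column j hit index k?  (q iterates over range(2, (n-1)//j + 1))
def hitB (n j : Int) (k : Nat) : Bool :=
  (PySem.List.pyRange 2 (PySem.Int.floordiv (n - 1) j + 1) 1).any (fun q => (j * q).toNat == k)

theorem setfold_length (j : Int) (Q : List Int) (d : List (List Int)) :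
    (Q.foldl (fun d q => d.set (j * q).toNat (d.getD (j * q).toNat [] ++ [j])) d).length
      = d.length := by
  induction Q generalizing d with
  | nil => rfl
  | cons q Q ih =>
      show (List.foldl _ (d.set (j * q).toNat (d.getD (j * q).toNat [] ++ [j])) Q).length = d.length
      rw [ih]
      exact List.length_set

theorem setfold_getD (j : Int) :
    ∀ (Q : List Int) (d : List (List Int)) (k : Nat), k < d.length →
      (Q.foldl (fun d q => d.set (j * q).toNat (d.getD (j * q).toNat [] ++ [j])) d).getD k []
        = d.getD k [] ++ (Q.filter (fun q => (j * q).toNat == k)).map (fun _ => j) := by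
  intro Q
  induction Q with
  | nil => intro d k _; simp
  | cons q Q ih =>
      intro d k hk
      by_cases hq : (j * q).toNat = k
      · have : (d.set (j * q).toNat (d.getD (j * q).toNat [] ++ [j])).getD k []
            = d.getD k [] ++ [j] := by
          subst hq
          simp [List.getD, hk]
        simp only [List.foldl_cons]
        rw [ih _ k (by simpa using hk), this]
        simp [hq]
      · have : (d.set (j * q).toNat (d.getD (j * q).toNat [] ++ [j])).getD k []
            = d.getD k [] := by
          simp [List.getD_eq_getElem?_getD, List.getElem?_set_ne hq]
        simp only [List.foldl_cons]
        rw [ih _ k (by simpa using hk), this]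
        simp [hq]

theorem filter_map_const_single {α β : Type} (j : β) :
    ∀ (Q : List α) (p : α → Bool), Q.Nodup →
      (∀ a ∈ Q, ∀ b ∈ Q, p a → p b → a = b) →
      (Q.filter p).map (fun _ => j) = if Q.any p then [j] else [] := by
  intro Q
  induction Q with
  | nil => intro p _ _; simp
  | cons a Q ih =>
      intro p hnd huniq
      by_cases ha : p a
      · have hnone : Q.filter p = [] := by
          rw [List.filter_eq_nil_iff]
          intro b hb hpb
          have : a = b := huniq a (by simp) b (by simp [hb]) ha hpb
          exact (List.nodup_cons.mp hnd).1 (this ▸ hb)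
        simp [ha, hnone]
      · rw [List.filter_cons, if_neg (by simpa using ha),
          ih p (List.nodup_cons.mp hnd).2
            (fun x hx y hy => huniq x (by simp [hx]) y (by simp [hy]))]
        simp [List.any_cons, ha]

theorem sieveJ_getD (n j : Int) (hj : 2 ≤ j) (d : List (List Int)) (k : Nat)
    (hk : k < d.length) :
    (sieveJ n j d).getD k [] = d.getD k [] ++ (if hitB n j k then [j] else []) := by
  unfold sieveJ hitB
  rw [setfold_getD j _ d k hk]
  have huniq : ∀ a ∈ PySem.List.pyRange 2 (PySem.Int.floordiv (n - 1) j + 1) 1,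
      ∀ b ∈ PySem.List.pyRange 2 (PySem.Int.floordiv (n - 1) j + 1) 1,
      (fun q => (j * q).toNat == k) a → (fun q => (j * q).toNat == k) b → a = b := by
    intro a ha b hb hpa hpb
    rw [PySem.List.mem_pyRange_one] at ha hb
    rw [beq_iff_eq] at hpa hpb
    have h4a : (4 : Int) ≤ j * a := by nlinarith [ha.1]
    have h4b : (4 : Int) ≤ j * b := by nlinarith [hb.1]
    have hab : j * a = j * b := by omega
    have hj0 : j ≠ 0 := by omega
    exact mul_left_cancel₀ hj0 hab
  rw [filter_map_const_single j _ _ (PySem.List.nodup_pyRange_one 2 _) huniq]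

theorem sieve_getD (n : Int) :
    ∀ (J : List Int) (d : List (List Int)) (k : Nat), k < d.length →
      (∀ j ∈ J, 2 ≤ j) →
      (J.foldl (fun d j => sieveJ n j d) d).getD k []
        = d.getD k [] ++ J.filter (fun j => hitB n j k) := by
  intro J
  induction J with
  | nil => intro d k _ _; simp
  | cons j J ih =>
      intro d k hk hJ
      simp only [List.foldl_cons]
      rw [ih (sieveJ n j d) k (by unfold sieveJ; rw [setfold_length]; exact hk)
        (fun j' hj' => hJ j' (by simp [hj'])),
        sieveJ_getD n j (hJ j (by simp)) d k hk]
      by_cases h : hitB n j k <;> simp [h]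

-- the sieve collects exactly A's divisor list
theorem hitB_eq_cond (n i j : Int) (hi : 2 ≤ i) (hin : i < n) (hj : 2 ≤ j) :
    hitB n j i.toNat = (PySem.Int.mod i j == 0 && i != j) := by
  have hj0 : (0 : Int) < j := by omega
  rcases hcond : (PySem.Int.mod i j == 0 && i != j) with _ | _
  · -- condition false: no q hits i
    rw [Bool.and_eq_false_iff] at hcond
    apply Bool.eq_false_iff.mpr
    intro hhit
    unfold hitB at hhit
    rw [List.any_eq_true] at hhit
    obtain ⟨q, hqmem, hq⟩ := hhit
    rw [PySem.List.mem_pyRange_one] at hqmem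
    have h4 : (4 : Int) ≤ j * q := by nlinarith [hqmem.1]
    have heq : j * q = i := by
      rw [beq_iff_eq] at hq
      omega
    rcases hcond with h | h
    · have : j ∣ i := ⟨q, heq.symm⟩
      rw [← PySem.Int.mod_eq_zero_iff_dvd] at this
      simp [this] at h
    · have : i ≠ j := by nlinarith [hqmem.1]
      simp [this] at h
  · -- condition true: q = i / j works
    rw [Bool.and_eq_true] at hcond
    obtain ⟨hmod, hne⟩ := hcond
    have hdvd : j ∣ i := PySem.Int.mod_eq_zero_iff_dvd i j |>.mp (by
      have := of_decide_eq_true (by exact_mod_cast hmod)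
      exact this)
    obtain ⟨q, hq⟩ := hdvd
    have hine : i ≠ j := by simpa using hne
    have hq2 : 2 ≤ q := by
      rcases (by omega : q ≤ 0 ∨ q = 1 ∨ 2 ≤ q) with h0 | h1 | h2
      · nlinarith
      · exact absurd (by rw [hq, h1, mul_one]) hine
      · exact h2
    unfold hitB
    rw [List.any_eq_true]
    refine ⟨q, ?_, ?_⟩
    · rw [PySem.List.mem_pyRange_one]
      refine ⟨hq2, ?_⟩
      have hle : q * j ≤ n - 1 := by nlinarith
      have := (PySem.Int.le_floordiv_iff_mul_le (by omega : (0:Int) < j)).mpr hle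
      omega
    · rw [hq]; simp

theorem sieved_getD (n i : Int) (hi : 2 ≤ i) (hin : i < n) :
    (sieved n).getD i.toNat [] = divsA n i := by
  unfold sieved
  rw [sieve_getD n (PySem.List.pyRange 2 n 1) (List.replicate n.toNat []) i.toNat
    (by simp [List.length_replicate]; omega)
    (fun j hj => ((PySem.List.mem_pyRange_one).mp hj).1)]
  rw [List.getD_eq_getElem?_getD, List.getElem?_replicate, if_pos (by omega)]
  simp only [Option.getD_some, List.nil_append]
  apply List.filter_congr
  intro j hj
  exact hitB_eq_cond n i j hi hin ((PySem.List.mem_pyRange_one).mp hj).1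

theorem main_eq (n : Int) : priem_getallen n = priem_getallen_alt n := by
  rw [priem_getallen_eq_flatMap, flatMap_ite_eq_filter_map]
  show _ = (PySem.List.pyRange 2 n 1).foldl (fun acc i =>
    if (sieved n).getD i.toNat [] ≠ [] then acc ++ [(i, (sieved n).getD i.toNat [])] else acc) []
  have hfold := PySem.List.foldl_append_ite (fun i : Int => (sieved n).getD i.toNat [] ≠ [])
    (fun i : Int => (i, (sieved n).getD i.toNat [])) (PySem.List.pyRange 2 n 1) []
  rw [hfold, List.nil_append]
  have hfil : (PySem.List.pyRange 2 n 1).filter (fun i => decide (divsA n i ≠ []))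
      = (PySem.List.pyRange 2 n 1).filter (fun i => decide ((sieved n).getD i.toNat [] ≠ [])) := by
    apply List.filter_congr
    intro i hi
    have hm := (PySem.List.mem_pyRange_one).mp hi
    rw [sieved_getD n i hm.1 hm.2]
  rw [hfil]
  apply List.map_congr_left
  intro i hi
  have hm := (PySem.List.mem_pyRange_one).mp (List.mem_of_mem_filter hi)
  rw [sieved_getD n i hm.1 hm.2]

-- ===== VERDICT (by name: the statement is the Claim_ definition above) =====
theorem priem_getallen_spec : Claim_equal_priem_getallen := by
  intro n _
  unfold Spec_priem_getallen
  exact main_eq n
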